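-- pv_equiv track=rewrite | github.com/amine4567/ner_transformers | utils.py | split_str_into_words
-- ===== SOURCE A (Python) =====
-- from itertools import groupby
--
-- def split_str_into_words(sentence: str):
--     for k, g in groupby(enumerate(sentence), lambda x: x[1].isalnum()):
--         word_split = list(g)
--         if k:
--             word_str = "".join([elt[1] for elt in word_split])
--             yield word_str
--         else:
--             for char in word_split:
--                 if not char[1].isspace():
--                     yield char[1]
-- ===== SOURCE B (Python) =====
-- def split_str_into_words(sentence: str):
--     buf = []
--     for ch in sentence:
--         if ch.isalnum():
--             buf.append(ch)
--         else:
--             if buf: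
--                 yield "".join(buf)
--                 buf = []
--             if not ch.isspace():
--                 yield ch
--     if buf:
--         yield "".join(buf)
-- ===== Notes on version B (the rewrite author's own statement) =====
-- stated objective: simpler
-- what changed: Replaces the groupby-over-enumerate grouping (materialising each run with its indices and post-processing it by key) with a plain single character loop that maintains a current-word buffer and flushes it at each non-alphanumeric character.
import Mathlib
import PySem

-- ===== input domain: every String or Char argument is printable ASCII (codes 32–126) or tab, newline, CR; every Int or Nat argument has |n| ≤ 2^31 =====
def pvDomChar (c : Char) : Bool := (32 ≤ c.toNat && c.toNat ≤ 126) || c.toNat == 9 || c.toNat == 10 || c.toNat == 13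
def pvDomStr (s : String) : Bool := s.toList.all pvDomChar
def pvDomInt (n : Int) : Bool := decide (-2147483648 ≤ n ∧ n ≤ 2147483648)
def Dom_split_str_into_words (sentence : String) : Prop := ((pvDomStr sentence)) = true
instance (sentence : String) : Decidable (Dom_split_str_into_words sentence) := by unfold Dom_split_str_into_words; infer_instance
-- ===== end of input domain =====

-- B replaces A's groupby grouping abstraction with a single buffer-and-flush character loop (objective: simpler).

-- ===== PORT A =====
-- itertools.groupby over the characters, keyed by isalnum: the list of maximal runs
-- (the enumerate indices are never used except to reach the character, so runs carry chars only)
def pvRuns : List Char → List (Bool × List Char)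
  | [] => []
  | c :: cs =>
      let k := PySem.Chars.isalnum c
      (k, c :: cs.takeWhile (fun d => PySem.Chars.isalnum d == k)) ::
        pvRuns (cs.dropWhile (fun d => PySem.Chars.isalnum d == k))
  termination_by cs => cs.length
  decreasing_by
    have := List.length_dropWhile_le (fun d => PySem.Chars.isalnum d == PySem.Chars.isalnum c) cs
    simpa using Nat.lt_succ_of_le this

def split_str_into_words (sentence : String) : List String :=
  (pvRuns sentence.toList).flatMap (fun kg =>
    if kg.1 then [String.mk kg.2]
    else (kg.2.filter (fun c => !PySem.Chars.isspace c)).map (fun c => String.mk [c]))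

-- ===== PORT B =====
-- single pass, buffer of the current word, flushed at each non-alphanumeric character
def pvAltGo (buf : List Char) : List Char → List String
  | [] => if buf.isEmpty then [] else [String.mk buf]
  | c :: cs =>
      if PySem.Chars.isalnum c then pvAltGo (buf ++ [c]) cs
      else (if buf.isEmpty then [] else [String.mk buf]) ++
           (if PySem.Chars.isspace c then [] else [String.mk [c]]) ++ pvAltGo [] cs

def split_str_into_words_alt (sentence : String) : List String := pvAltGo [] sentence.toList

-- ===== PRECONDITION & SPEC =====
def Spec_split_str_into_words (sentence : String) (out : List String) : Prop := out = split_str_into_words_alt sentence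
instance (sentence : String) (out : List String) : Decidable (Spec_split_str_into_words sentence out) := by unfold Spec_split_str_into_words; infer_instance

-- ===== CLAIM (what is proved, stated in full; the proofs are below) =====
def Claim_equal_split_str_into_words : Prop := ∀ (sentence : String), Dom_split_str_into_words sentence → Spec_split_str_into_words sentence (split_str_into_words sentence)

-- ===== LEMMAS AND PROOFS =====

def pvF : Bool × List Char → List String := fun kg =>
    if kg.1 then [String.mk kg.2]
    else (kg.2.filter (fun c => !PySem.Chars.isspace c)).map (fun c => String.mk [c])

theorem pvRuns_nil : pvRuns [] = [] := by rw [pvRuns.eq_def]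

theorem pvRuns_cons (c : Char) (cs : List Char) :
    pvRuns (c :: cs) =
      (PySem.Chars.isalnum c,
        c :: cs.takeWhile (fun d => PySem.Chars.isalnum d == PySem.Chars.isalnum c)) ::
        pvRuns (cs.dropWhile (fun d => PySem.Chars.isalnum d == PySem.Chars.isalnum c)) := by
  rw [pvRuns.eq_def]

-- feeding a run of alphanumeric characters just grows the buffer
theorem pvAlt_word (w : List Char) : ∀ (buf cs : List Char),
    (∀ c ∈ w, PySem.Chars.isalnum c = true) →
    pvAltGo buf (w ++ cs) = pvAltGo (buf ++ w) cs := by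
  induction w with
  | nil => intro buf cs _; simp
  | cons c w ih =>
      intro buf cs h
      have hc : PySem.Chars.isalnum c = true := h c (by simp)
      simp only [List.cons_append, pvAltGo, hc, if_pos]
      rw [ih (buf ++ [c]) cs (fun d hd => h d (by simp [hd]))]
      simp

-- feeding a run of non-alphanumeric characters with an empty buffer yields its non-space chars
theorem pvAlt_syms (g : List Char) : ∀ (cs : List Char),
    (∀ c ∈ g, PySem.Chars.isalnum c = false) →
    pvAltGo [] (g ++ cs) =
      (g.filter (fun c => !PySem.Chars.isspace c)).map (fun c => String.mk [c]) ++ pvAltGo [] cs := by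
  induction g with
  | nil => intro cs _; simp
  | cons c g ih =>
      intro cs h
      have hc : PySem.Chars.isalnum c = false := h c (by simp)
      simp only [List.cons_append, pvAltGo, hc, List.isEmpty_nil, if_neg, Bool.false_eq_true,
        not_false_eq_true, if_true, List.nil_append, List.filter_cons]
      rw [ih cs (fun d hd => h d (by simp [hd]))]
      by_cases hs : PySem.Chars.isspace c = true <;> simp [hs]

-- a nonempty buffer is flushed at the end or before a non-alphanumeric character
theorem pvAlt_flush (buf cs : List Char) (hb : buf ≠ [])
    (hcs : cs = [] ∨ ∃ d ds, cs = d :: ds ∧ PySem.Chars.isalnum d = false) :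
    pvAltGo buf cs = String.mk buf :: pvAltGo [] cs := by
  rcases hcs with h | ⟨d, ds, rfl, hd⟩
  · subst h; simp [pvAltGo, hb]
  · simp [pvAltGo, hd, hb]

theorem pv_main : ∀ (n : Nat) (cs : List Char), cs.length ≤ n →
    pvAltGo [] cs = (pvRuns cs).flatMap pvF := by
  intro n
  induction n with
  | zero =>
      intro cs h
      have : cs = [] := List.eq_nil_of_length_eq_zero (Nat.le_zero.mp h)
      subst this; simp [pvAltGo, pvRuns_nil]
  | succ n ih =>
      intro cs h
      cases cs with
      | nil => simp [pvAltGo, pvRuns_nil]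
      | cons c cs' =>
        set k := PySem.Chars.isalnum c with hk
        set p : Char → Bool := fun d => PySem.Chars.isalnum d == k with hp
        have hsplit : c :: cs' = (c :: cs'.takeWhile p) ++ cs'.dropWhile p := by
          simp [List.takeWhile_append_dropWhile]
        have hlen : (cs'.dropWhile p).length ≤ n := by
          have := List.length_dropWhile_le p cs'
          simp at h; omega
        have hdw : cs'.dropWhile p = [] ∨
            ∃ d ds, cs'.dropWhile p = d :: ds ∧ p d = false := by
          cases hdrop : cs'.dropWhile p with
          | nil => exact Or.inl rfl
          | cons d ds =>
            refine Or.inr ⟨d, ds, rfl, ?_⟩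
            have := List.head_dropWhile_not p (show cs'.dropWhile p ≠ [] by simp [hdrop])
            simpa [hdrop] using this
        have hruns : pvRuns (c :: cs') =
            (k, c :: cs'.takeWhile p) :: pvRuns (cs'.dropWhile p) := by
          rw [pvRuns_cons]
        have htw : ∀ d ∈ cs'.takeWhile p, PySem.Chars.isalnum d = k := by
          intro d hd
          have := List.mem_takeWhile_imp hd
          simpa [hp] using this
        cases hkk : k with
        | true =>
            have hall : ∀ d ∈ c :: cs'.takeWhile p, PySem.Chars.isalnum d = true := by
              intro d hd
              rcases List.mem_cons.mp hd with rfl | hd'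
              · rw [← hk, hkk]
              · rw [htw d hd', hkk]
            rw [hruns]; conv_lhs => rw [hsplit]
            rw [pvAlt_word _ [] _ hall, List.nil_append]
            have hflush := pvAlt_flush (c :: cs'.takeWhile p) (cs'.dropWhile p) (by simp)
              (by rcases hdw with h1 | ⟨d, ds, h1, h2⟩
                  · exact Or.inl h1
                  · refine Or.inr ⟨d, ds, h1, ?_⟩
                    simpa [hp, hkk] using h2)
            rw [hflush, ih _ hlen]
            simp [pvF, hkk]
        | false =>
            have hall : ∀ d ∈ c :: cs'.takeWhile p, PySem.Chars.isalnum d = false := by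
              intro d hd
              rcases List.mem_cons.mp hd with rfl | hd'
              · rw [← hk, hkk]
              · rw [htw d hd', hkk]
            rw [hruns]; conv_lhs => rw [hsplit]
            rw [pvAlt_syms _ _ hall, ih _ hlen]
            simp [pvF, hkk]

-- ===== VERDICT (by name: the statement is the Claim_ definition above) =====
theorem split_str_into_words_spec : Claim_equal_split_str_into_words := by
  intro sentence _
  unfold Spec_split_str_into_words split_str_into_words split_str_into_words_alt
  rw [pv_main sentence.toList.length sentence.toList le_rfl]
  rfl
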